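-- pv_equiv track=rewrite | github.com/chess99/auto-duolingo | order_b.py | find_and_order_words
-- ===== SOURCE A (Python) =====
-- def find_and_order_words(boxes, translated_sentence):
--     # Split the translated sentence into words
--     translated_words = translated_sentence.split()
--     # Initialize an empty list to store the ordered words with their coordinates
--     ordered_boxes = []
--     # Iterate over each word in the translated sentence
--     for word in translated_words:
--         # Find the first box that matches the word and hasn't been used yet
--         for box in boxes:
--             if box[0] == word and box not in ordered_boxes:
--                 ordered_boxes.append(box)
--                 break
--     return ordered_boxes
-- ===== SOURCE B (Python) =====
-- def find_and_order_words(boxes, translated_sentence):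
--     # Index boxes by their first word once: word -> queue of distinct unused boxes
--     # (first-occurrence order, duplicates collapsed as A's value-based membership test does).
--     queues = {}
--     for box in boxes:
--         q = queues.setdefault(box[0], [])
--         if box not in q:
--             q.append(box)
--     ordered_boxes = []
--     for word in translated_sentence.split():
--         q = queues.get(word)
--         if q:
--             ordered_boxes.append(q.pop(0))
--     return ordered_boxes
-- ===== Notes on version B (the rewrite author's own statement) =====
-- stated objective: alternative
-- what changed: Instead of rescanning all boxes (and the growing used-list) for every word, B builds one dict from first word to the queue of distinct matching boxes and pops the head per word.
-- outside the precondition, e.g. on find_and_order_words([[]], ''): A returns [], B raises IndexError; on find_and_order_words([['a'], []], 'a'): A returns [['a']], B raises IndexError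
import Mathlib
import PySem

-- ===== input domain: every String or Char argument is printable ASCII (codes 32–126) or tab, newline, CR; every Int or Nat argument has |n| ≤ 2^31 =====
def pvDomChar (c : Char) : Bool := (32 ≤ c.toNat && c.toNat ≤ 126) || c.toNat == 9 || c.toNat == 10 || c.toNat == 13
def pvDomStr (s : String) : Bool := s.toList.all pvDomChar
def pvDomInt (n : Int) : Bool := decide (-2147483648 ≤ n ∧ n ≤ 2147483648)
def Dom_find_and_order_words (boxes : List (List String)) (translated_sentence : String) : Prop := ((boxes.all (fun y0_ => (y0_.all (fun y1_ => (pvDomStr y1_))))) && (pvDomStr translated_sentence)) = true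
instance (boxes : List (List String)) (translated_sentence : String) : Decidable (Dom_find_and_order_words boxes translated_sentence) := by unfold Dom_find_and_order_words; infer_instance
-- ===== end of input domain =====

-- B replaces A's per-word rescans of all boxes with a dict from first word to the
-- queue of distinct matching boxes, popped per word (objective: alternative algorithm).
-- ===== PORT A =====
-- inner 'for box in boxes: if box[0] == word and box not in ordered_boxes: append; break'
-- (box[0] via pyGet?: on an empty box Python raises IndexError — those inputs are outside Pre_)
def pvInnerA (word : String) : List (List String) → List (List String) → List (List String)
  | [], ord => ord
  | b :: rest, ord =>
    if PySem.List.pyGet? b 0 = some word ∧ b ∉ ord then ord ++ [b]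
    else pvInnerA word rest ord

def find_and_order_words (boxes : List (List String)) (translated_sentence : String) : List (List String) :=
  (PySem.Str.split₀ translated_sentence).foldl (fun ord word => pvInnerA word boxes ord) []

-- ===== PORT B =====
-- 'q = queues.setdefault(box[0], []); if box not in q: q.append(box)'
-- (box[0] via pyGet?: on an empty box Python raises IndexError — those inputs are outside Pre_)
def pvBuildQueues (boxes : List (List String)) : PySem.Dict String (List (List String)) :=
  boxes.foldl
    (fun d b =>
      match PySem.List.pyGet? b 0 with
      | none => d
      | some k =>
        let q := d.getD k []
        if b ∈ q then d else d.insert k (q ++ [b]))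
    PySem.Dict.empty

-- 'q = queues.get(word); if q: ordered_boxes.append(q.pop(0))'
def find_and_order_words_alt (boxes : List (List String)) (translated_sentence : String) : List (List String) :=
  ((PySem.Str.split₀ translated_sentence).foldl
    (fun (st : List (List String) × PySem.Dict String (List (List String))) word =>
      match st.2.get? word with
      | some (b :: rest) => (st.1 ++ [b], st.2.insert word rest)
      | _ => st)
    ([], pvBuildQueues boxes)).1

-- ===== PRECONDITION & SPEC =====
-- Pre_ excludes inputs containing an empty box: Python indexes box[0], so B always raises
-- IndexError there and A raises on every such input whose word scan reaches the empty box
-- (on the few where A returns — e.g. no words, or a match breaks first — B still raises).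
def Pre_find_and_order_words (boxes : List (List String)) (translated_sentence : String) : Prop :=
  -- e.g. boxes = [["hola"], [], ["mundo"]] with translated_sentence = "mundo" raises IndexError in A
  [] ∉ boxes
instance (boxes : List (List String)) (translated_sentence : String) : Decidable (Pre_find_and_order_words boxes translated_sentence) := by unfold Pre_find_and_order_words; infer_instance

def pvWitness_find_and_order_words : List (List String) × String :=
  ([["hola", "x"], ["mundo", "y"], ["hola", "z"]], "hola mundo hola")

def Spec_find_and_order_words (boxes : List (List String)) (translated_sentence : String) (out : List (List String)) : Prop := out = find_and_order_words_alt boxes translated_sentence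
instance (boxes : List (List String)) (translated_sentence : String) (out : List (List String)) : Decidable (Spec_find_and_order_words boxes translated_sentence out) := by unfold Spec_find_and_order_words; infer_instance

-- ===== CLAIM (what is proved, stated in full; the proofs are below) =====
def Claim_equal_find_and_order_words : Prop := ∀ (boxes : List (List String)) (translated_sentence : String), Dom_find_and_order_words boxes translated_sentence → Pre_find_and_order_words boxes translated_sentence → Spec_find_and_order_words boxes translated_sentence (find_and_order_words boxes translated_sentence)

-- ===== LEMMAS AND PROOFS =====

-- first-occurrence dedup of the boxes whose first word is w, relative to already-seen boxes
def pvIdxFrom (w : String) : List (List String) → List (List String) → List (List String)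
  | [], _ => []
  | b :: rest, seen =>
    if PySem.List.pyGet? b 0 = some w ∧ b ∉ seen
    then b :: pvIdxFrom w rest (seen ++ [b])
    else pvIdxFrom w rest seen

lemma mem_pvIdxFrom {w : String} {boxes seen : List (List String)} {x : List String}
    (h : x ∈ pvIdxFrom w boxes seen) : PySem.List.pyGet? x 0 = some w ∧ x ∉ seen := by
  induction boxes generalizing seen with
  | nil => simp [pvIdxFrom] at h
  | cons b rest ih =>
    unfold pvIdxFrom at h
    split at h
    · rename_i hc
      rcases List.mem_cons.mp h with rfl | h'
      · exact hc
      · have := ih h'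
        exact ⟨this.1, fun hx => this.2 (by simp [hx])⟩
    · exact ih h

lemma nodup_pvIdxFrom (w : String) (boxes seen : List (List String)) :
    (pvIdxFrom w boxes seen).Nodup := by
  induction boxes generalizing seen with
  | nil => simp [pvIdxFrom]
  | cons b rest ih =>
    unfold pvIdxFrom
    split
    · refine List.nodup_cons.mpr ⟨fun hb => ?_, ih _⟩
      exact (mem_pvIdxFrom hb).2 (by simp)
    · exact ih _

-- the queues dict after the build loop
lemma pvBuild_go (boxes : List (List String)) (d : PySem.Dict String (List (List String)))
    (w : String) :
    (boxes.foldl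
      (fun d b =>
        match PySem.List.pyGet? b 0 with
        | none => d
        | some k =>
          let q := d.getD k []
          if b ∈ q then d else d.insert k (q ++ [b])) d).get? w =
    match d.get? w with
    | none => if pvIdxFrom w boxes [] = [] then none else some (pvIdxFrom w boxes [])
    | some q => some (q ++ pvIdxFrom w boxes q) := by
  induction boxes generalizing d with
  | nil => cases hd : d.get? w <;> simp [pvIdxFrom, hd]
  | cons b rest ih =>
    simp only [List.foldl_cons]
    cases hb : PySem.List.pyGet? b 0 with
    | none =>
      rw [ih d]
      cases hd : d.get? w <;> simp [pvIdxFrom, hb]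
    | some k =>
      dsimp only
      by_cases hkw : k = w
      · subst hkw
        cases hd : d.get? k with
        | none =>
          have hq : d.getD k [] = [] := PySem.Dict.getD_of_get?_eq_none _ _ hd
          rw [hq, if_neg (List.not_mem_nil), List.nil_append]
          rw [ih, PySem.Dict.get?_insert_self]
          simp [pvIdxFrom, hb]
        | some q =>
          have hq : d.getD k [] = q := PySem.Dict.getD_of_get?_eq_some _ _ hd
          rw [hq]
          by_cases hbq : b ∈ q
          · rw [if_pos hbq, ih, hd]
            simp [pvIdxFrom, hb, hbq]
          · rw [if_neg hbq, ih, PySem.Dict.get?_insert_self]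
            simp [pvIdxFrom, hb, hbq, List.append_assoc]
      · have hd2 : (if b ∈ d.getD k [] then d else d.insert k (d.getD k [] ++ [b])).get? w
            = d.get? w := by
          split
          · rfl
          · exact PySem.Dict.get?_insert_of_ne _ _ (fun h => hkw h.symm)
        rw [ih, hd2]
        cases hd : d.get? w <;> simp [pvIdxFrom, hb, hkw]

-- A's inner scan picks the first not-yet-used box of the deduped per-word index
lemma pvInnerA_eq_idx (w : String) (boxes : List (List String)) (ord seen : List (List String))
    (hsub : ∀ x ∈ seen, x ∈ ord) :
    pvInnerA w boxes ord =
      match ((pvIdxFrom w boxes seen).filter (fun b => b ∉ ord)).head? with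
      | some b => ord ++ [b]
      | none => ord := by
  induction boxes generalizing seen with
  | nil => simp [pvInnerA, pvIdxFrom]
  | cons b rest ih =>
    unfold pvInnerA pvIdxFrom
    by_cases h1 : PySem.List.pyGet? b 0 = some w
    · by_cases h2 : b ∈ ord
      · have hA : ¬ (PySem.List.pyGet? b 0 = some w ∧ b ∉ ord) := by tauto
        rw [if_neg hA]
        by_cases h3 : b ∈ seen
        · rw [if_neg (by tauto)]
          exact ih seen hsub
        · rw [if_pos ⟨h1, h3⟩]
          have : (b :: pvIdxFrom w rest (seen ++ [b])).filter (fun b => decide (b ∉ ord)) =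
              (pvIdxFrom w rest (seen ++ [b])).filter (fun b => decide (b ∉ ord)) := by
            simp [h2]
          rw [this]
          exact ih (seen ++ [b]) (by intro x hx; rcases List.mem_append.mp hx with h | h
                                     · exact hsub x h
                                     · simp at h; subst h; exact h2)
      · rw [if_pos ⟨h1, h2⟩]
        have h3 : b ∉ seen := fun hb => h2 (hsub b hb)
        rw [if_pos ⟨h1, h3⟩]
        simp [h2]
    · have hA : ¬ (PySem.List.pyGet? b 0 = some w ∧ b ∉ ord) := by tauto
      rw [if_neg hA, if_neg (by tauto)]
      exact ih seen hsub

def pvIdx (boxes : List (List String)) (w : String) : List (List String) :=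
  pvIdxFrom w boxes []

-- the invariant tying A's used-list to B's queues
def pvInv (boxes : List (List String)) (ord : List (List String))
    (d : PySem.Dict String (List (List String))) : Prop :=
  ∀ w, d.get? w =
    if pvIdx boxes w = [] then none
    else some ((pvIdx boxes w).filter (fun b => b ∉ ord))

lemma pvInv_init (boxes : List (List String)) : pvInv boxes [] (pvBuildQueues boxes) := by
  intro w
  unfold pvBuildQueues
  rw [pvBuild_go boxes PySem.Dict.empty w]
  rw [PySem.Dict.get?_empty]
  unfold pvIdx
  split <;> simp_all

lemma pvStep (boxes : List (List String)) (ord : List (List String))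
    (d : PySem.Dict String (List (List String))) (w : String) (hinv : pvInv boxes ord d) :
    (match d.get? w with
      | some (b :: rest) => (ord ++ [b], d.insert w rest)
      | _ => (ord, d)) =
    (pvInnerA w boxes ord,
      (match d.get? w with
        | some (b :: rest) => (ord ++ [b], d.insert w rest)
        | _ => (ord, d)).2) ∧
    pvInv boxes (pvInnerA w boxes ord)
      (match d.get? w with
        | some (b :: rest) => (ord ++ [b], d.insert w rest)
        | _ => (ord, d)).2 := by
  have hA := pvInnerA_eq_idx w boxes ord [] (by simp)
  rw [show pvIdxFrom w boxes [] = pvIdx boxes w from rfl] at hA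
  have hget := hinv w
  by_cases hidx : pvIdx boxes w = []
  · rw [if_pos hidx] at hget
    have hA' : pvInnerA w boxes ord = ord := by
      rw [hA, hidx]; simp
    rw [hget]
    exact ⟨by simp [hA'], by simpa [hA'] using hinv⟩
  · rw [if_neg hidx] at hget
    cases hf : (pvIdx boxes w).filter (fun b => b ∉ ord) with
    | nil =>
      have hA' : pvInnerA w boxes ord = ord := by rw [hA, hf]; simp
      rw [hget, hf]
      exact ⟨by simp [hA'], by simpa [hA'] using hinv⟩
    | cons b t =>
      have hA' : pvInnerA w boxes ord = ord ++ [b] := by rw [hA, hf]; simp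
      rw [hget, hf]
      refine ⟨by simp [hA'], ?_⟩
      simp only
      rw [hA']
      intro w'
      by_cases hw' : w' = w
      · rw [hw', PySem.Dict.get?_insert_self, if_neg hidx]
        -- filter with the enlarged ord equals the tail t
        have hnd : ((pvIdx boxes w).filter (fun b => b ∉ ord)).Nodup :=
          (nodup_pvIdxFrom w boxes []).filter _
      
        rw [hf] at hnd
        have hbt : b ∉ t := (List.nodup_cons.mp hnd).1
        have : (pvIdx boxes w).filter (fun x => x ∉ ord ++ [b]) =
            ((pvIdx boxes w).filter (fun x => x ∉ ord)).filter (fun x => x ≠ b) := by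
          rw [List.filter_filter]
          apply List.filter_congr
          intro x _
          simp only [List.mem_append, List.mem_singleton]
          by_cases h1 : x ∈ ord <;> by_cases h2 : x = b <;> simp [h1, h2]
        have hsub : (pvIdx boxes w).filter (fun x => x ∉ ord ++ [b]) = t := by
          rw [this, hf, List.filter_cons]
          rw [if_neg (by simp)]
          exact List.filter_eq_self.mpr (fun x hx => by
            simp only [ne_eq, decide_eq_true_eq]
            exact fun h => hbt (h ▸ hx))
        rw [hsub]
      · rw [PySem.Dict.get?_insert_of_ne _ _ hw', hinv w']
        by_cases hidx' : pvIdx boxes w' = []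
        · simp [hidx']
        · rw [if_neg hidx', if_neg hidx']
          congr 1
          apply List.filter_congr
          intro x hx
          have hxw : PySem.List.pyGet? x 0 = some w' := (mem_pvIdxFrom hx).1
          have hxb : x ≠ b := by
            intro h
            have hbmem : b ∈ (pvIdx boxes w).filter (fun x => x ∉ ord) := by rw [hf]; simp
            have hb2 := (mem_pvIdxFrom (List.mem_of_mem_filter hbmem)).1
            rw [← h, hxw] at hb2
            exact hw' (Option.some.inj hb2)
          simp only [List.mem_append, List.mem_singleton]
          simp [hxb]

lemma pvLoop (boxes : List (List String)) (words : List String)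
    (ord : List (List String)) (d : PySem.Dict String (List (List String)))
    (hinv : pvInv boxes ord d) :
    (words.foldl
      (fun (st : List (List String) × PySem.Dict String (List (List String))) word =>
        match st.2.get? word with
        | some (b :: rest) => (st.1 ++ [b], st.2.insert word rest)
        | _ => st)
      (ord, d)).1 =
    words.foldl (fun ord word => pvInnerA word boxes ord) ord := by
  induction words generalizing ord d with
  | nil => rfl
  | cons w ws ih =>
    simp only [List.foldl_cons]
    obtain ⟨heq, hinv'⟩ := pvStep boxes ord d w hinv
    rw [heq]
    exact ih _ _ hinv'

-- ===== VERDICT (by name: the statement is the Claim_ definition above) =====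
theorem find_and_order_words_spec : Claim_equal_find_and_order_words := by
  intro boxes s _ _
  unfold Spec_find_and_order_words find_and_order_words find_and_order_words_alt
  exact (pvLoop boxes (PySem.Str.split₀ s) [] (pvBuildQueues boxes) (pvInv_init boxes)).symm
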